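-- pv_equiv track=rewrite | github.com/Lewdwig-V/unslop | unslop/scripts/validation/symbol_audit.py | compute_spec_diff
-- ===== SOURCE A (Python) =====
-- def compute_spec_diff(old_spec: str, new_spec: str) -> dict:
--     """Section-level markdown diff between two spec versions.
--
--     Parses ``## `` headings into ``{heading: content}`` maps and compares values.
--
--     Parameters
--     ----------
--     old_spec:
--         The old spec markdown text.
--     new_spec:
--         The new spec markdown text.
--
--     Returns
--     -------
--     dict with keys: changed_sections, unchanged_sections.
--     """
--     old_sections = _parse_md_sections(old_spec)
--     new_sections = _parse_md_sections(new_spec)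
--
--     all_headings = set(old_sections.keys()) | set(new_sections.keys())
--     changed: list[str] = []
--     unchanged: list[str] = []
--
--     for heading in sorted(all_headings):
--         old_content = old_sections.get(heading)
--         new_content = new_sections.get(heading)
--         if old_content == new_content:
--             unchanged.append(heading)
--         else:
--             changed.append(heading)
--
--     return {"changed_sections": changed, "unchanged_sections": unchanged}
--
-- def _parse_md_sections(text: str) -> dict[str, str]:
--     """Parse markdown into {heading: content} by ``## `` boundaries."""
--     sections: dict[str, str] = {}
--     current_heading: str | None = None
--     current_lines: list[str] = []
--
--     for line in text.splitlines():
--         if line.startswith("## "):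
--             if current_heading is not None:
--                 sections[current_heading] = "\n".join(current_lines).strip()
--             current_heading = line[3:].strip()
--             current_lines = []
--         else:
--             current_lines.append(line)
--
--     if current_heading is not None:
--         sections[current_heading] = "\n".join(current_lines).strip()
--
--     return sections
-- ===== SOURCE B (Python) =====
-- def _sections(lines):
--     """Index-and-slice section list: skip the preamble to the first '## '
--     heading, take the body slice up to the next heading, recurse on the rest."""
--     i = 0
--     while i < len(lines) and not lines[i].startswith("## "):
--         i += 1
--     if i == len(lines):
--         return []
--     k = i + 1
--     while k < len(lines) and not lines[k].startswith("## "):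
--         k += 1
--     head = lines[i][3:].strip()
--     body = "\n".join(lines[i + 1:k]).strip()
--     return [(head, body)] + _sections(lines[k:])
--
--
-- def compute_spec_diff(old_spec: str, new_spec: str) -> dict:
--     old_sections = dict(_sections(old_spec.splitlines()))
--     new_sections = dict(_sections(new_spec.splitlines()))
--     headings = sorted(set(old_sections) | set(new_sections))
--     changed = [h for h in headings if old_sections.get(h) != new_sections.get(h)]
--     unchanged = [h for h in headings if old_sections.get(h) == new_sections.get(h)]
--     return {"changed_sections": changed, "unchanged_sections": unchanged}
-- ===== Notes on version B (the rewrite author's own statement) =====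
-- stated objective: alternative
-- what changed: The streaming parser (one loop carrying current_heading/current_lines accumulator state with flushes) is replaced by an index-and-slice recursion (skip to the next '## ' heading, slice the body lines up to the following heading, recurse) whose pairs are fed to dict() at once, and the diff loop with two accumulator lists is replaced by two comprehensions over the sorted headings.
import Mathlib
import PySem

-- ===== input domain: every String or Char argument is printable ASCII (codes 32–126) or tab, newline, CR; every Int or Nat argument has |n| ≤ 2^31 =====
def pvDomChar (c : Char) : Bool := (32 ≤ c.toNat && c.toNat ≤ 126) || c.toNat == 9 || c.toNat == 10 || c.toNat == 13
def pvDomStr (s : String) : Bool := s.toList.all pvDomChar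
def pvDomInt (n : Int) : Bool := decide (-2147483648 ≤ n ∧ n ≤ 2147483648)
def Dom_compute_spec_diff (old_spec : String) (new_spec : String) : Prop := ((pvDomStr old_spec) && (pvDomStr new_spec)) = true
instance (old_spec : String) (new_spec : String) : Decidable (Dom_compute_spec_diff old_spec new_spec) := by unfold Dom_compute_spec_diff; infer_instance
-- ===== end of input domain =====

-- B replaces A's streaming accumulator parser by an index-and-slice recursion and the
-- two-accumulator diff loop by two filters; same cost, alternative decomposition.

-- ===== PORT A =====
-- sections[current_heading] = "\n".join(current_lines).strip()  (done when current_heading is not None)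
def pvFlushA (sections : PySem.Dict String String) (h? : Option String) (cur : List String) :
    PySem.Dict String String :=
  match h? with
  | none => sections
  | some h => sections.insert h (PySem.Str.strip (PySem.Str.join "\n" cur))

-- one iteration of A's for-loop over the lines; state = (sections, current_heading, current_lines)
def pvStepA (st : PySem.Dict String String × Option String × List String) (line : String) :
    PySem.Dict String String × Option String × List String :=
  if PySem.Str.startswith line "## " then
    (pvFlushA st.1 st.2.1 st.2.2,
     some (PySem.Str.strip (PySem.Str.slice line (some 3) none)), [])
  else
    (st.1, st.2.1, st.2.2 ++ [line])

def pvParseA (text : String) : PySem.Dict String String :=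
  let st := (PySem.Str.splitlines text).foldl pvStepA (PySem.Dict.empty, none, [])
  pvFlushA st.1 st.2.1 st.2.2

def compute_spec_diff (old_spec : String) (new_spec : String) : List (String × List String) :=
  let old_sections := pvParseA old_spec
  let new_sections := pvParseA new_spec
  let all_headings : PySem.Set String :=
    PySem.Set.union (PySem.Set.ofList old_sections.keys) (PySem.Set.ofList new_sections.keys)
  let st := (PySem.List.sorted all_headings (fun x => x) false).foldl
    (fun (p : List String × List String) heading =>
      if old_sections.get? heading == new_sections.get? heading then (p.1, p.2 ++ [heading])
      else (p.1 ++ [heading], p.2))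
    ([], [])
  [("changed_sections", st.1), ("unchanged_sections", st.2)]

-- ===== PORT B =====
def pvHead (line : String) : Bool := PySem.Str.startswith line "## "

-- Source B _sections: skip the preamble (first while = dropWhile), slice the body up to the
-- next heading (second while = takeWhile/dropWhile on the tail), recurse on the rest
def pvSectionsB (lines : List String) : List (String × String) :=
  match _h : lines.dropWhile (fun l => !pvHead l) with
  | [] => []
  | l :: rest =>
      (PySem.Str.strip (PySem.Str.slice l (some 3) none),
       PySem.Str.strip (PySem.Str.join "\n" (rest.takeWhile (fun l => !pvHead l)))) ::
        pvSectionsB (rest.dropWhile (fun l => !pvHead l))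
termination_by lines.length
decreasing_by
  have h1 : (lines.dropWhile (fun l => !pvHead l)).length ≤ lines.length :=
    List.length_dropWhile_le _ _
  have h2 : (rest.dropWhile (fun l => !pvHead l)).length ≤ rest.length :=
    List.length_dropWhile_le _ _
  rw [_h] at h1
  simp at h1
  omega

def pvParseB (text : String) : PySem.Dict String String :=
  PySem.Dict.ofList (pvSectionsB (PySem.Str.splitlines text))

def compute_spec_diff_alt (old_spec : String) (new_spec : String) : List (String × List String) :=
  let old_sections := pvParseB old_spec
  let new_sections := pvParseB new_spec
  let headings := PySem.List.sorted
    (PySem.Set.union (PySem.Set.ofList old_sections.keys) (PySem.Set.ofList new_sections.keys))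
    (fun x => x) false
  let changed := headings.filter (fun h => !(old_sections.get? h == new_sections.get? h))
  let unchanged := headings.filter (fun h => old_sections.get? h == new_sections.get? h)
  [("changed_sections", changed), ("unchanged_sections", unchanged)]

-- ===== PRECONDITION & SPEC =====
def Spec_compute_spec_diff (old_spec : String) (new_spec : String) (out : List (String × List String)) : Prop := out = compute_spec_diff_alt old_spec new_spec
instance (old_spec : String) (new_spec : String) (out : List (String × List String)) : Decidable (Spec_compute_spec_diff old_spec new_spec out) := by unfold Spec_compute_spec_diff; infer_instance

-- ===== CLAIM (what is proved, stated in full; the proofs are below) =====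
def Claim_equal_compute_spec_diff : Prop := ∀ (old_spec : String) (new_spec : String), Dom_compute_spec_diff old_spec new_spec → Spec_compute_spec_diff old_spec new_spec (compute_spec_diff old_spec new_spec)

-- ===== LEMMAS AND PROOFS =====

def pvIns (d : PySem.Dict String String) (p : String × String) : PySem.Dict String String :=
  d.insert p.1 p.2

-- A's loop+final-flush, as a single function of the full state
def pvRunA (d : PySem.Dict String String) (h? : Option String) (cur : List String)
    (lines : List String) : PySem.Dict String String :=
  let st := lines.foldl pvStepA (d, h?, cur)
  pvFlushA st.1 st.2.1 st.2.2

theorem pvSectionsB_nil (lines : List String)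
    (h : lines.dropWhile (fun l => !pvHead l) = []) : pvSectionsB lines = [] := by
  rw [pvSectionsB]
  split
  · rfl
  · rename_i l rest heq
    rw [h] at heq
    cases heq

theorem pvSectionsB_cons (lines : List String) (l : String) (rest : List String)
    (h : lines.dropWhile (fun l => !pvHead l) = l :: rest) :
    pvSectionsB lines =
      (PySem.Str.strip (PySem.Str.slice l (some 3) none),
       PySem.Str.strip (PySem.Str.join "\n" (rest.takeWhile (fun l => !pvHead l)))) ::
        pvSectionsB (rest.dropWhile (fun l => !pvHead l)) := by
  rw [pvSectionsB]
  split
  · rename_i heq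
    rw [h] at heq
    cases heq
  · rename_i l' rest' heq
    rw [h] at heq
    cases heq
    rfl

theorem pvSectionsB_congr (xs ys : List String)
    (h : xs.dropWhile (fun l => !pvHead l) = ys.dropWhile (fun l => !pvHead l)) :
    pvSectionsB xs = pvSectionsB ys := by
  cases hd : ys.dropWhile (fun l => !pvHead l) with
  | nil => rw [pvSectionsB_nil xs (by rw [h, hd]), pvSectionsB_nil ys hd]
  | cons l rest => rw [pvSectionsB_cons xs l rest (by rw [h, hd]), pvSectionsB_cons ys l rest hd]

theorem pvRunA_some (lines : List String) : ∀ (d : PySem.Dict String String) (h : String)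
    (cur : List String),
    pvRunA d (some h) cur lines =
      List.foldl pvIns
        (d.insert h (PySem.Str.strip
          (PySem.Str.join "\n" (cur ++ lines.takeWhile (fun l => !pvHead l)))))
        (pvSectionsB (lines.dropWhile (fun l => !pvHead l))) := by
  induction lines with
  | nil =>
    intro d h cur
    simp [pvRunA, pvFlushA, pvSectionsB_nil [] rfl]
  | cons l rest ih =>
    intro d h cur
    by_cases hl : pvHead l
    · have hl' : PySem.Chars.startswith l.toList ['#', '#', ' '] = true := by
        simpa [pvHead] using hl
      have hstep : pvStepA (d, some h, cur) l =
        (d.insert h (PySem.Str.strip (PySem.Str.join "\n" cur)),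
         some (PySem.Str.strip (PySem.Str.slice l (some 3) none)), []) := by
        simp [pvStepA, pvFlushA, hl']
      have hLHS : pvRunA d (some h) cur (l :: rest) =
          pvRunA (d.insert h (PySem.Str.strip (PySem.Str.join "\n" cur)))
            (some (PySem.Str.strip (PySem.Str.slice l (some 3) none))) [] rest := by
        simp [pvRunA, List.foldl_cons, hstep]
      rw [hLHS, ih]
      have hdw : (l :: rest).dropWhile (fun l => !pvHead l) = l :: rest := by
        rw [List.dropWhile_cons_of_neg]; simp [hl]
      have htw : (l :: rest).takeWhile (fun l => !pvHead l) = [] := by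
        rw [List.takeWhile_cons_of_neg]; simp [hl]
      rw [hdw, htw]
      rw [pvSectionsB_cons (l :: rest) l rest hdw]
      simp [pvIns, List.foldl_cons]

    · have hl' : PySem.Chars.startswith l.toList ['#', '#', ' '] = false := by
        simpa [pvHead] using hl
      have hstep : pvStepA (d, some h, cur) l = (d, some h, cur ++ [l]) := by
        simp [pvStepA, hl']
      have hLHS : pvRunA d (some h) cur (l :: rest) = pvRunA d (some h) (cur ++ [l]) rest := by
        simp [pvRunA, List.foldl_cons, hstep]
      rw [hLHS, ih]
      have hdw : (l :: rest).dropWhile (fun l => !pvHead l) =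
          rest.dropWhile (fun l => !pvHead l) := by
        rw [List.dropWhile_cons_of_pos]; simp [hl]
      have htw : (l :: rest).takeWhile (fun l => !pvHead l) =
          l :: rest.takeWhile (fun l => !pvHead l) := by
        rw [List.takeWhile_cons_of_pos]; simp [hl]
      rw [hdw, htw]
      simp

theorem pvRunA_none (lines : List String) : ∀ (d : PySem.Dict String String) (cur : List String),
    pvRunA d none cur lines = List.foldl pvIns d (pvSectionsB lines) := by
  induction lines with
  | nil =>
    intro d cur
    simp [pvRunA, pvFlushA, pvSectionsB_nil [] rfl]
  | cons l rest ih =>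
    intro d cur
    by_cases hl : pvHead l
    · have hl' : PySem.Chars.startswith l.toList ['#', '#', ' '] = true := by
        simpa [pvHead] using hl
      have hstep : pvStepA (d, none, cur) l =
        (d, some (PySem.Str.strip (PySem.Str.slice l (some 3) none)), []) := by
        simp [pvStepA, pvFlushA, hl']
      have hLHS : pvRunA d none cur (l :: rest) =
          pvRunA d (some (PySem.Str.strip (PySem.Str.slice l (some 3) none))) [] rest := by
        simp [pvRunA, List.foldl_cons, hstep]
      rw [hLHS, pvRunA_some]
      have hdw : (l :: rest).dropWhile (fun l => !pvHead l) = l :: rest := by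
        rw [List.dropWhile_cons_of_neg]; simp [hl]
      rw [pvSectionsB_cons (l :: rest) l rest hdw]
      simp [pvIns, List.foldl_cons]

    · have hl' : PySem.Chars.startswith l.toList ['#', '#', ' '] = false := by
        simpa [pvHead] using hl
      have hstep : pvStepA (d, none, cur) l = (d, none, cur ++ [l]) := by
        simp [pvStepA, hl']
      have hLHS : pvRunA d none cur (l :: rest) = pvRunA d none (cur ++ [l]) rest := by
        simp [pvRunA, List.foldl_cons, hstep]
      rw [hLHS, ih]
      congr 1
      have hdw : (l :: rest).dropWhile (fun l => !pvHead l) =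
          rest.dropWhile (fun l => !pvHead l) := by
        rw [List.dropWhile_cons_of_pos]; simp [hl]
      exact pvSectionsB_congr _ _ hdw.symm

theorem pvParse_eq (text : String) : pvParseA text = pvParseB text := by
  have h1 : pvParseA text = pvRunA PySem.Dict.empty none [] (PySem.Str.splitlines text) := rfl
  rw [h1, pvRunA_none]
  rfl

theorem pvDiff_fold (p : String → Bool) (hs : List String) :
    ∀ (c u : List String),
    hs.foldl (fun (st : List String × List String) h =>
      if p h then (st.1, st.2 ++ [h]) else (st.1 ++ [h], st.2)) (c, u) =
    (c ++ hs.filter (fun h => !p h), u ++ hs.filter p) := by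
  induction hs with
  | nil => intro c u; simp
  | cons l rest ih =>
    intro c u
    by_cases hl : p l
    · simp [List.foldl_cons, hl, ih]
    · simp [List.foldl_cons, hl, ih]

-- ===== VERDICT (by name: the statement is the Claim_ definition above) =====
theorem compute_spec_diff_spec : Claim_equal_compute_spec_diff := by
  intro old_spec new_spec _
  unfold Spec_compute_spec_diff compute_spec_diff compute_spec_diff_alt
  rw [pvParse_eq old_spec, pvParse_eq new_spec]
  simp only [pvDiff_fold]
  simp
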